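-- pv_equiv track=rewrite | github.com/wtliao/layout2img | 2.py | miniAndMaxiDegrees
-- ===== SOURCE A (Python) =====
-- def miniAndMaxiDegrees(graph):
--     # each line of graph represents a directed edge
--
--     in_degree = {}
--     out_degree = {}
--     for g in graph:
--         out_degree[g[0]] = out_degree.get(g[0], 0) + 1
--         in_degree[g[1]] = in_degree.get(g[1], 0) + 1
--
--     in_nodes = list(in_degree.keys())
--     out_nodes = list(out_degree.keys())
--     in_nodes_null = set(out_nodes) - set(in_nodes)  # nodes that do not have input
--     out_nodes_null = set(in_nodes) - set(out_nodes) # nodes that do not have output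
--     # set these nodes as zeros
--     for i in in_nodes_null:
--         in_degree[i] = in_degree.get(i, 0)
--     for i in out_nodes_null:
--         out_degree[i] = out_degree.get(i, 0)
--
--     in_degree_values = list(in_degree.values())
--     min_in_degree = min(in_degree_values)
--     max_in_degree = max(in_degree_values)
--     out_degree_values = list(out_degree.values())
--     min_out_degree = min(out_degree_values)
--     max_out_degree = max(out_degree_values)
--     return min_in_degree, max_in_degree, min_out_degree, max_out_degree
-- ===== SOURCE B (Python) =====
-- def run_lengths(xs):
--     # lengths of the maximal blocks of equal adjacent elements
--     runs = []
--     cnt = 0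
--     prev = None
--     for x in xs:
--         if cnt > 0 and x == prev:
--             cnt += 1
--         else:
--             if cnt > 0:
--                 runs.append(cnt)
--             cnt = 1
--             prev = x
--     if cnt > 0:
--         runs.append(cnt)
--     return runs
--
-- def miniAndMaxiDegrees(graph):
--     # sort-and-scan: each degree is a run length of the sorted endpoint list;
--     # a node-count mismatch with the combined node list means some degree is 0
--     sources = sorted(g[0] for g in graph)
--     targets = sorted(g[1] for g in graph)
--     in_runs = run_lengths(targets)
--     out_runs = run_lengths(sources)
--     n_nodes = len(run_lengths(sorted(sources + targets)))
--     min_in = min(in_runs) if len(in_runs) == n_nodes else 0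
--     max_in = max(in_runs)
--     min_out = min(out_runs) if len(out_runs) == n_nodes else 0
--     max_out = max(out_runs)
--     return min_in, max_in, min_out, max_out
-- ===== Notes on version B (the rewrite author's own statement) =====
-- stated objective: alternative
-- what changed: B replaces A's hash-dict degree counting plus set-difference zero-patching with a sort-based algorithm: degrees are the run lengths of the sorted endpoint lists, and a zero minimum is detected by comparing the number of runs with the number of distinct nodes in the combined sorted list.
import Mathlib
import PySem

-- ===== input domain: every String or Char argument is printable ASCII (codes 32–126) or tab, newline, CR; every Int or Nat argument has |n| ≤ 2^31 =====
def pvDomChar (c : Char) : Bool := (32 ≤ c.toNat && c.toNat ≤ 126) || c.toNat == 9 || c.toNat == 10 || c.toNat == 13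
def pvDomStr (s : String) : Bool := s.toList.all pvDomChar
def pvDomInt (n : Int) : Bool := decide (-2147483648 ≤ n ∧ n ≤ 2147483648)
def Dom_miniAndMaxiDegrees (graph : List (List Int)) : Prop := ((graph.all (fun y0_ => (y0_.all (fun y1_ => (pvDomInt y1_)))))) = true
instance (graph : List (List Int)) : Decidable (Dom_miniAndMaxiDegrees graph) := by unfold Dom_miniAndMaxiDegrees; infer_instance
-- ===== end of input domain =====

-- B replaces A's dict counting + set-difference zero-patching by a sort-based algorithm:
-- degrees are run lengths of the sorted endpoint lists; equivalence of the return values is proved on Pre_.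


-- ===== PORT A =====
def miniAndMaxiDegrees (graph : List (List Int)) : Int × Int × Int × Int :=
  let dicts := graph.foldl
    (fun (p : PySem.Dict Int Int × PySem.Dict Int Int) g =>
      (p.1.insert (PySem.List.pyGetD g 0 0) (p.1.getD (PySem.List.pyGetD g 0 0) 0 + 1),
       p.2.insert (PySem.List.pyGetD g 1 0) (p.2.getD (PySem.List.pyGetD g 1 0) 0 + 1)))
    (PySem.Dict.empty, PySem.Dict.empty)
  let in_nodes := dicts.2.keys
  let out_nodes := dicts.1.keys
  let in_nodes_null := PySem.Set.diff (PySem.Set.ofList out_nodes) (PySem.Set.ofList in_nodes)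
  let out_nodes_null := PySem.Set.diff (PySem.Set.ofList in_nodes) (PySem.Set.ofList out_nodes)
  let in_degree := in_nodes_null.foldl (fun d i => d.insert i (d.getD i 0)) dicts.2
  let out_degree := out_nodes_null.foldl (fun d i => d.insert i (d.getD i 0)) dicts.1
  let in_degree_values := in_degree.values
  let out_degree_values := out_degree.values
  ((PySem.List.min? in_degree_values (fun y => y)).getD 0,
   (PySem.List.max? in_degree_values (fun y => y)).getD 0,
   (PySem.List.min? out_degree_values (fun y => y)).getD 0,
   (PySem.List.max? out_degree_values (fun y => y)).getD 0)

-- ===== PORT B =====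
-- run_lengths: loop state is (runs, cnt, prev); Python's initial prev = None is only
-- ever compared under 'cnt > 0', so the port's initial prev = 0 is never read.
def rlStep (st : List Int × Int × Int) (x : Int) : List Int × Int × Int :=
  if 0 < st.2.1 ∧ x = st.2.2 then (st.1, st.2.1 + 1, st.2.2)
  else ((if 0 < st.2.1 then st.1 ++ [st.2.1] else st.1), 1, x)

def runLengths (xs : List Int) : List Int :=
  let st := xs.foldl rlStep ([], 0, 0)
  if 0 < st.2.1 then st.1 ++ [st.2.1] else st.1

def miniAndMaxiDegrees_alt (graph : List (List Int)) : Int × Int × Int × Int :=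
  let sources := PySem.List.sorted (graph.map (fun g => PySem.List.pyGetD g 0 0)) (fun x => x) false
  let targets := PySem.List.sorted (graph.map (fun g => PySem.List.pyGetD g 1 0)) (fun x => x) false
  let in_runs := runLengths targets
  let out_runs := runLengths sources
  let n_nodes := (runLengths (PySem.List.sorted (sources ++ targets) (fun x => x) false)).length
  let min_in := if in_runs.length = n_nodes then (PySem.List.min? in_runs (fun y => y)).getD 0 else 0
  let max_in := (PySem.List.max? in_runs (fun y => y)).getD 0
  let min_out := if out_runs.length = n_nodes then (PySem.List.min? out_runs (fun y => y)).getD 0 else 0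
  let max_out := (PySem.List.max? out_runs (fun y => y)).getD 0
  (min_in, max_in, min_out, max_out)

-- ===== PRECONDITION & SPEC =====
-- Pre_ excludes exactly the inputs on which Python A raises: the empty graph (ValueError
-- in min() of an empty list) and an edge with fewer than two entries (IndexError on g[0]/g[1]).
def Pre_miniAndMaxiDegrees (graph : List (List Int)) : Prop :=
  graph ≠ [] ∧ ∀ g ∈ graph, 2 ≤ g.length
instance (graph : List (List Int)) : Decidable (Pre_miniAndMaxiDegrees graph) := by
  unfold Pre_miniAndMaxiDegrees; infer_instance
def pvWitness_miniAndMaxiDegrees : List (List Int) := [[0, 1], [1, 0], [0, 2]]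

def Spec_miniAndMaxiDegrees (graph : List (List Int)) (out : Int × Int × Int × Int) : Prop := out = miniAndMaxiDegrees_alt graph
instance (graph : List (List Int)) (out : Int × Int × Int × Int) : Decidable (Spec_miniAndMaxiDegrees graph out) := by unfold Spec_miniAndMaxiDegrees; infer_instance

-- ===== CLAIM (what is proved, stated in full; the proofs are below) =====
def Claim_equal_miniAndMaxiDegrees : Prop := ∀ (graph : List (List Int)), Dom_miniAndMaxiDegrees graph → Pre_miniAndMaxiDegrees graph → Spec_miniAndMaxiDegrees graph (miniAndMaxiDegrees graph)

-- ===== LEMMAS AND PROOFS =====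

-- the in- and out-endpoint lists and the combined node set (proof-side abbreviations)
def pvOuts (graph : List (List Int)) : List Int := graph.map (fun g => PySem.List.pyGetD g 0 0)
def pvIns (graph : List (List Int)) : List Int := graph.map (fun g => PySem.List.pyGetD g 1 0)
def pvN (graph : List (List Int)) : List Int := PySem.Set.ofList (pvIns graph ++ pvOuts graph)

-- min/max of a list are invariant under permutation
theorem pvMin_perm {l1 l2 : List Int} (h : l1.Perm l2) :
    PySem.List.min? l1 (fun y => y) = PySem.List.min? l2 (fun y => y) := by
  rcases l1 with _ | ⟨x, t⟩
  · rw [h.nil_eq]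
  · rcases l2 with _ | ⟨y, s⟩
    · exact absurd h.symm.nil_eq (by simp)
    · rw [PySem.List.min?_id_cons, PySem.List.min?_id_cons]
      have ha : (x :: t).min? = some (t.foldl min x) := rfl
      have hb : (y :: s).min? = some (s.foldl min y) := rfl
      rw [List.min?_eq_some_iff] at ha hb
      congr 1
      exact le_antisymm (ha.2 _ (h.mem_iff.mpr hb.1)) (hb.2 _ (h.mem_iff.mp ha.1))

theorem pvMax_perm {l1 l2 : List Int} (h : l1.Perm l2) :
    PySem.List.max? l1 (fun y => y) = PySem.List.max? l2 (fun y => y) := by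
  rcases l1 with _ | ⟨x, t⟩
  · rw [h.nil_eq]
  · rcases l2 with _ | ⟨y, s⟩
    · exact absurd h.symm.nil_eq (by simp)
    · rw [PySem.List.max?_id_cons, PySem.List.max?_id_cons]
      have ha : (x :: t).max? = some (t.foldl max x) := rfl
      have hb : (y :: s).max? = some (s.foldl max y) := rfl
      rw [List.max?_eq_some_iff] at ha hb
      congr 1
      exact le_antisymm (hb.2 _ (h.mem_iff.mp ha.1)) (ha.2 _ (h.mem_iff.mpr hb.1))

-- ----- characterisation of A -----

theorem pvPatch_values (s : List Int) (d : PySem.Dict Int Int)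
    (hf : ∀ i ∈ s, d.contains i = false) (hs : s.Nodup) :
    (s.foldl (fun d i => d.insert i (d.getD i 0)) d).values
      = d.values ++ s.map (fun _ => (0 : Int)) := by
  induction s generalizing d with
  | nil => simp
  | cons i s ih =>
    have hci : d.contains i = false := hf i (by simp)
    have h0 : d.getD i 0 = 0 := PySem.Dict.getD_of_not_contains d 0 hci
    simp only [List.foldl_cons, h0]
    rw [ih]
    · simp [PySem.Dict.values, PySem.Dict.items_insert_of_not_contains d 0 hci]
    · intro j hj
      rw [PySem.Dict.contains_insert]
      have : j ≠ i := by rintro rfl; exact (List.nodup_cons.mp hs).1 hj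
      simp [this, hf j (by simp [hj])]
    · exact (List.nodup_cons.mp hs).2

theorem pvSideVals (xs ys nodes : List Int) (hn : nodes.Nodup)
    (hmem : ∀ a, a ∈ nodes ↔ a ∈ xs ∨ a ∈ ys) :
    ((PySem.Set.diff (PySem.Set.ofList ys) (PySem.Set.ofList xs)).foldl
        (fun d i => d.insert i (d.getD i 0))
        (xs.foldl (fun d x => d.insert x (d.getD x 0 + 1)) (PySem.Dict.empty : PySem.Dict Int Int))).values.Perm
      (nodes.map (fun n => ((xs.count n : Int)))) := by
  set D := xs.foldl (fun d x => d.insert x (d.getD x 0 + 1)) (PySem.Dict.empty : PySem.Dict Int Int) with hD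
  have hkeys : D.keys = PySem.Set.ofList xs := by
    rw [hD, PySem.Dict.keys_foldl_insert]
    simp [PySem.Set.update_nil_left]
  have hnd : D.keys.Nodup := by rw [hkeys]; exact PySem.Set.nodup_ofList xs
  have hget : ∀ v, D.getD v 0 = (xs.count v : Int) := by
    intro v; rw [hD, PySem.Dict.getD_foldl_insert_add_one]; simp
  set S := PySem.Set.diff (PySem.Set.ofList ys) (PySem.Set.ofList xs) with hS
  have hf : ∀ i ∈ S, D.contains i = false := by
    intro i hi
    have : i ∉ D.keys := by
      rw [hkeys]
      exact ((PySem.Set.mem_diff _ _ _).mp hi).2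
    cases h : D.contains i with
    | false => rfl
    | true => exact absurd ((PySem.Dict.contains_iff_mem_keys D i).mp h) this
  have hSnd : S.Nodup := PySem.Set.nodup_diff _ _ (PySem.Set.nodup_ofList ys)
  rw [pvPatch_values S D hf hSnd]
  rw [PySem.Dict.values_eq_map_keys D hnd 0, hkeys]
  have h1 : (PySem.Set.ofList xs).map (fun k => D.getD k 0)
      = (PySem.Set.ofList xs).map (fun n => ((xs.count n : Int))) :=
    List.map_congr_left (fun k _ => hget k)
  have h2 : S.map (fun _ => (0 : Int)) = S.map (fun n => ((xs.count n : Int))) := by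
    apply List.map_congr_left
    intro i hi
    have : i ∉ xs := by
      have := ((PySem.Set.mem_diff _ _ _).mp hi).2
      simpa [PySem.Set.mem_ofList] using this
    simp [List.count_eq_zero.mpr this]
  rw [h1, h2, ← List.map_append]
  apply List.Perm.map
  rw [List.perm_ext_iff_of_nodup ?hnd1 hn]
  · intro a
    simp only [List.mem_append, PySem.Set.mem_ofList, PySem.Set.mem_diff, hmem, hS]
    tauto
  · rw [List.nodup_append]
    refine ⟨PySem.Set.nodup_ofList xs, hSnd, ?_⟩
    intro a ha b hb
    rintro rfl
    exact ((PySem.Set.mem_diff (PySem.Set.ofList ys) (PySem.Set.ofList xs) a).mp hb).2 ha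

theorem pvAsplit (graph : List (List Int)) :
  (graph.foldl
    (fun (p : PySem.Dict Int Int × PySem.Dict Int Int) g =>
      (p.1.insert (PySem.List.pyGetD g 0 0) (p.1.getD (PySem.List.pyGetD g 0 0) 0 + 1),
       p.2.insert (PySem.List.pyGetD g 1 0) (p.2.getD (PySem.List.pyGetD g 1 0) 0 + 1)))
    (PySem.Dict.empty, PySem.Dict.empty)) =
  ((pvOuts graph).foldl (fun d x => d.insert x (d.getD x 0 + 1)) PySem.Dict.empty,
   (pvIns graph).foldl (fun d x => d.insert x (d.getD x 0 + 1)) PySem.Dict.empty) := by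
  unfold pvOuts pvIns
  rw [List.foldl_map, List.foldl_map]
  exact PySem.List.foldl_prod_mk (fun (d : PySem.Dict Int Int) g => d.insert (PySem.List.pyGetD g 0 0) (d.getD (PySem.List.pyGetD g 0 0) 0 + 1)) (fun (d : PySem.Dict Int Int) g => d.insert (PySem.List.pyGetD g 1 0) (d.getD (PySem.List.pyGetD g 1 0) 0 + 1)) graph _ _

-- A returns the min/max over the combined node set of the in/out endpoint counts
theorem pvAchar (graph : List (List Int)) :
    miniAndMaxiDegrees graph =
      ((PySem.List.min? ((pvN graph).map (fun n => ((pvIns graph).count n : Int))) (fun y => y)).getD 0,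
       (PySem.List.max? ((pvN graph).map (fun n => ((pvIns graph).count n : Int))) (fun y => y)).getD 0,
       (PySem.List.min? ((pvN graph).map (fun n => ((pvOuts graph).count n : Int))) (fun y => y)).getD 0,
       (PySem.List.max? ((pvN graph).map (fun n => ((pvOuts graph).count n : Int))) (fun y => y)).getD 0) := by
  simp only [miniAndMaxiDegrees]
  rw [pvAsplit]
  set outs := pvOuts graph with houts
  set ins := pvIns graph with hins
  set DO := outs.foldl (fun d x => d.insert x (d.getD x 0 + 1)) (PySem.Dict.empty : PySem.Dict Int Int) with hDO
  set DI := ins.foldl (fun d x => d.insert x (d.getD x 0 + 1)) (PySem.Dict.empty : PySem.Dict Int Int) with hDI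
  have hkeysI : DI.keys = PySem.Set.ofList ins := by
    rw [hDI, PySem.Dict.keys_foldl_insert]; simp [PySem.Set.update_nil_left]
  have hkeysO : DO.keys = PySem.Set.ofList outs := by
    rw [hDO, PySem.Dict.keys_foldl_insert]; simp [PySem.Set.update_nil_left]
  rw [hkeysI, hkeysO, PySem.Set.ofList_ofList, PySem.Set.ofList_ofList]
  have hnd : (pvN graph).Nodup := PySem.Set.nodup_ofList _
  have hnodesmem : ∀ a, a ∈ pvN graph ↔ a ∈ ins ∨ a ∈ outs := by
    intro a
    rw [pvN, PySem.Set.mem_ofList, List.mem_append, ← hins, ← houts]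
  have pin := pvSideVals ins outs (pvN graph) hnd hnodesmem
  have pout := pvSideVals outs ins (pvN graph) hnd (fun a => by rw [hnodesmem a]; tauto)
  rw [pvMin_perm pin, pvMax_perm pin, pvMin_perm pout, pvMax_perm pout]

-- ----- characterisation of B -----

-- rlExt prev cnt l = run lengths of (cnt copies of prev) ++ l : the meaning of the loop state
def rlExt (prev cnt : Int) : List Int → List Int
  | [] => [cnt]
  | x :: t => if x = prev then rlExt prev (cnt + 1) t else cnt :: rlExt x 1 t

theorem pvRl_foldl (l : List Int) : ∀ (runs : List Int) (cnt prev : Int), 0 < cnt →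
    (let st := l.foldl rlStep (runs, cnt, prev);
     if 0 < st.2.1 then st.1 ++ [st.2.1] else st.1) = runs ++ rlExt prev cnt l := by
  induction l with
  | nil => intro runs cnt prev h; simp [rlExt, h]
  | cons x t ih =>
    intro runs cnt prev h
    simp only [List.foldl_cons, rlStep]
    by_cases hx : x = prev
    · simp only [hx, h, and_self, if_pos]
      rw [ih runs (cnt + 1) prev (by omega)]
      simp [rlExt]
    · have : ¬ (0 < cnt ∧ x = prev) := by tauto
      simp only [this, if_false, if_pos h]
      rw [ih (runs ++ [cnt]) 1 x (by omega)]
      simp [rlExt, hx]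

theorem pvRunLengths_cons (x : Int) (t : List Int) :
    runLengths (x :: t) = rlExt x 1 t := by
  have := pvRl_foldl t [] 1 x (by omega)
  simpa [runLengths] using this

theorem pvDiscard_eq_filter (s : List Int) (x : Int) :
    PySem.Set.discard s x = s.filter (fun y => !(y == x)) := by
  simp [PySem.Set.discard]

theorem pvDiscard_not_mem (s : List Int) (x : Int) (h : x ∉ s) :
    PySem.Set.discard s x = s := by
  rw [pvDiscard_eq_filter]
  apply List.filter_eq_self.mpr
  intro a ha
  simp only [Bool.not_eq_eq_eq_not, Bool.not_true, beq_eq_false_iff_ne, ne_eq]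
  rintro rfl; exact h ha

theorem pvOfList_cons_cons (x : Int) (t : List Int) :
    PySem.Set.ofList (x :: x :: t) = PySem.Set.ofList (x :: t) := by
  have hx : x ∉ PySem.Set.discard (PySem.Set.ofList t) x := by
    intro h; exact ((PySem.Set.mem_discard _ _ _).mp h).2 rfl
  rw [PySem.Set.ofList_cons, PySem.Set.ofList_cons]
  congr 1
  rw [pvDiscard_eq_filter, List.filter_cons]
  simp only [beq_self_eq_true, Bool.not_true, Bool.false_eq_true, if_false]
  rw [← pvDiscard_eq_filter]
  exact pvDiscard_not_mem _ _ hx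

theorem pvOfList_cons_not_mem (x : Int) (t : List Int) (hx : x ∉ t) :
    PySem.Set.ofList (x :: t) = x :: PySem.Set.ofList t := by
  rw [PySem.Set.ofList_cons]
  congr 1
  exact pvDiscard_not_mem _ _ (fun h => hx ((PySem.Set.mem_ofList _ _).mp h))

theorem pvRlExt_perm (t : List Int) : ∀ (x cnt : Int), (x :: t).Pairwise (· ≤ ·) →
    (rlExt x cnt t).Perm
      ((PySem.Set.ofList (x :: t)).map
        (fun v => (if v = x then cnt - 1 else 0) + ((x :: t).count v : Int))) := by
  induction t with
  | nil =>
    intro x cnt _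
    simp [rlExt, PySem.Set.ofList]
  | cons y t ih =>
    intro x cnt hp
    by_cases hyx : y = x
    · subst hyx
      have := ih y (cnt + 1) hp.tail
      rw [rlExt, if_pos rfl, pvOfList_cons_cons]
      refine this.trans (List.Perm.of_eq (List.map_congr_left ?_))
      intro v hv
      by_cases hvx : v = y
      · subst hvx
        simp only [List.count_cons_self]
        push_cast; ring
      · simp [hvx, Ne.symm hvx]
    · have hxnot : x ∉ y :: t := by
        intro hmem
        rcases List.mem_cons.mp hmem with h | hmem
        · exact hyx h.symm
        · have h1 : x ≤ y := (List.pairwise_cons.mp hp).1 y (by simp)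
          have h2 : y ≤ x := (List.pairwise_cons.mp hp.tail).1 x hmem
          exact hyx (le_antisymm h2 h1)
      rw [rlExt, if_neg hyx]
      have htail := ih y 1 hp.tail
      rw [pvOfList_cons_not_mem x (y :: t) hxnot, List.map_cons]
      have hcx : ((x :: y :: t).count x : Int) = 1 := by
        rw [List.count_cons_self, List.count_eq_zero.mpr hxnot]; simp
      have hhead : (if x = x then cnt - 1 else 0) + ((x :: y :: t).count x : Int) = cnt := by
        rw [if_pos rfl, hcx]; ring
      rw [hhead]
      refine List.Perm.cons cnt ?_
      refine htail.trans (List.Perm.of_eq (List.map_congr_left ?_))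
      intro v hv
      have hvmem : v ∈ y :: t := (PySem.Set.mem_ofList _ _).mp hv
      have hvx : v ≠ x := fun h => hxnot (h ▸ hvmem)
      by_cases hvy : v = y
      · subst hvy
        simp [hvx, Ne.symm hvx]
      · simp [hvx, Ne.symm hvx, hvy, Ne.symm hvy]

theorem pvRuns_perm (l : List Int) (hp : l.Pairwise (· ≤ ·)) :
    (runLengths l).Perm ((PySem.Set.ofList l).map (fun v => (l.count v : Int))) := by
  cases l with
  | nil => simp [runLengths]
  | cons x t =>
    rw [pvRunLengths_cons]
    refine (pvRlExt_perm t x 1 hp).trans (List.Perm.of_eq (List.map_congr_left ?_))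
    intro v hv
    by_cases hvx : v = x <;> simp [hvx]

-- ofList respects permutation (as a permutation)
theorem pvOfList_perm {xs ys : List Int} (h : xs.Perm ys) :
    (PySem.Set.ofList xs).Perm (PySem.Set.ofList ys) := by
  rw [List.perm_ext_iff_of_nodup (PySem.Set.nodup_ofList xs) (PySem.Set.nodup_ofList ys)]
  intro a
  simp [PySem.Set.mem_ofList, h.mem_iff]

-- min of a nonneg list containing 0 is 0
theorem pvMin_zero (l : List Int) (h0 : (0 : Int) ∈ l) (hpos : ∀ v ∈ l, 0 ≤ v) :
    PySem.List.min? l (fun y => y) = some 0 := by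
  cases hm : PySem.List.min? l (fun y => y) with
  | none =>
    rw [PySem.List.min?_eq_none_iff] at hm
    subst hm; cases h0
  | some m =>
    have h1 : 0 ≤ m := hpos m (PySem.List.min?_mem hm)
    have h2 : m ≤ 0 := PySem.List.min?_isMin hm 0 h0
    rw [le_antisymm h2 h1]

-- appending zeros does not change the max of a nonempty nonneg list
theorem pvMax_append_zeros (l zs : List Int) (hl : l ≠ [])
    (hpos : ∀ v ∈ l, 0 ≤ v) (hz : ∀ v ∈ zs, v = (0 : Int)) :
    PySem.List.max? (l ++ zs) (fun y => y) = PySem.List.max? l (fun y => y) := by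
  cases l with
  | nil => exact absurd rfl hl
  | cons x t =>
    rw [List.cons_append, PySem.List.max?_id_cons, PySem.List.max?_id_cons, List.foldl_append]
    congr 1
    have hm : (0 : Int) ≤ t.foldl max x := le_trans (hpos x (by simp)) (PySem.List.le_foldl_max _ _).1
    generalize hM : t.foldl max x = M at hm ⊢
    clear hM
    induction zs with
    | nil => rfl
    | cons z zs ihz =>
      rw [List.foldl_cons, hz z (by simp), max_eq_left hm]
      exact ihz (fun v hv => hz v (by simp [hv]))

-- the third sorted list counts the distinct nodes of the whole graph
theorem pvNnodes (graph : List (List Int)) :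
    (runLengths (PySem.List.sorted
        (PySem.List.sorted (pvOuts graph) (fun x => x) false ++
         PySem.List.sorted (pvIns graph) (fun x => x) false) (fun x => x) false)).length
      = (pvN graph).length := by
  set l := PySem.List.sorted
      (PySem.List.sorted (pvOuts graph) (fun x => x) false ++
       PySem.List.sorted (pvIns graph) (fun x => x) false) (fun x => x) false with hl
  have hp : l.Pairwise (· ≤ ·) := PySem.List.sorted_pairwise _ _
  have h1 := (pvRuns_perm l hp).length_eq
  rw [List.length_map] at h1
  have hperm : l.Perm (pvIns graph ++ pvOuts graph) := by
    refine (PySem.List.sorted_perm _ _ _).trans ?_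
    refine (List.Perm.append (PySem.List.sorted_perm _ _ _) (PySem.List.sorted_perm _ _ _)).trans ?_
    exact List.perm_append_comm
  have h2 := (pvOfList_perm hperm).length_eq
  rw [h1, pvN, h2]

-- one side of B (min and max of the run lengths of sorted xs) against the node-set form
theorem pvSideB (xs N : List Int) (hxs : xs ≠ []) (hN : N.Nodup)
    (hsub : ∀ v ∈ xs, v ∈ N) :
    ((if (runLengths (PySem.List.sorted xs (fun x => x) false)).length = N.length
        then (PySem.List.min? (runLengths (PySem.List.sorted xs (fun x => x) false)) (fun y => y)).getD 0
        else 0)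
      = (PySem.List.min? (N.map (fun n => ((xs.count n : Int)))) (fun y => y)).getD 0)
    ∧ (PySem.List.max? (runLengths (PySem.List.sorted xs (fun x => x) false)) (fun y => y)).getD 0
      = (PySem.List.max? (N.map (fun n => ((xs.count n : Int)))) (fun y => y)).getD 0 := by
  set ts := PySem.List.sorted xs (fun x => x) false with hts
  set runs := runLengths ts with hruns_def
  set D : List Int := PySem.Set.ofList xs with hD
  set c : Int → Int := fun n => ((xs.count n : Int)) with hc
  have htsperm : ts.Perm xs := PySem.List.sorted_perm _ _ _
  have hcount : ∀ v, ts.count v = xs.count v := fun v => htsperm.count_eq v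
  have hruns : runs.Perm (D.map c) := by
    refine (pvRuns_perm ts (PySem.List.sorted_pairwise _ _)).trans ?_
    have h1 : (PySem.Set.ofList ts).map (fun v => ((ts.count v : Int))) = (PySem.Set.ofList ts).map c := by
      apply List.map_congr_left; intro v _; simp [hc, hcount v]
    rw [h1]
    exact (pvOfList_perm htsperm).map c
  have hDnd : D.Nodup := PySem.Set.nodup_ofList xs
  have hDsub : D ⊆ N := fun v hv => hsub v ((PySem.Set.mem_ofList _ _).mp hv)
  have hDne : D ≠ [] := by
    cases xs with
    | nil => exact absurd rfl hxs
    | cons a t =>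
      intro h
      have : a ∈ D := (PySem.Set.mem_ofList _ _).mpr (by simp)
      rw [h] at this; cases this
  have hlen : runs.length = D.length := by rw [hruns.length_eq, List.length_map]
  have hpos : ∀ v ∈ N.map c, (0 : Int) ≤ v := by
    rintro v hv
    obtain ⟨n, -, rfl⟩ := List.mem_map.mp hv
    simp [hc]
  constructor
  · -- min
    by_cases hcond : runs.length = N.length
    · rw [if_pos hcond]
      have hDN : D.Perm N := by
        refine List.Subperm.perm_of_length_le (List.subperm_of_subset hDnd hDsub) ?_
        omega
      rw [pvMin_perm hruns, pvMin_perm (hDN.map c)]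
    · rw [if_neg hcond]
      have hex : ∃ n ∈ N, n ∉ D := by
        by_contra hno
        push Not at hno
        have hND : N.Perm D := by
          refine List.Subperm.perm_of_length_le (List.subperm_of_subset hN hno) ?_
          have := (List.subperm_of_subset hDnd hDsub).length_le
          omega
        exact hcond (by rw [hlen, hND.length_eq])
      obtain ⟨n, hnN, hnD⟩ := hex
      have hn0 : c n = 0 := by
        have : n ∉ xs := fun h => hnD ((PySem.Set.mem_ofList _ _).mpr h)
        simp [hc, List.count_eq_zero.mpr this]
      have h0mem : (0 : Int) ∈ N.map c := by
        rw [← hn0]; exact List.mem_map_of_mem hnN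
      rw [pvMin_zero _ h0mem hpos]
      rfl
  · -- max
    have hE : N.Perm (D ++ N.filter (fun v => decide (v ∉ D))) := by
      rw [List.perm_ext_iff_of_nodup hN ?hnd2]
      · intro a
        simp only [List.mem_append, List.mem_filter, decide_eq_true_eq]
        constructor
        · intro ha
          by_cases haD : a ∈ D
          · exact Or.inl haD
          · exact Or.inr ⟨ha, haD⟩
        · rintro (ha | ⟨ha, -⟩)
          · exact hDsub ha
          · exact ha
      · rw [List.nodup_append]
        refine ⟨hDnd, hN.filter _, ?_⟩
        intro a ha b hb
        rintro rfl
        have : a ∉ D := by simpa using List.of_mem_filter hb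
        exact this ha
    rw [pvMax_perm hruns, pvMax_perm (hE.map c), List.map_append]
    rw [pvMax_append_zeros]
    · simpa using hDne
    · intro v hv
      obtain ⟨n, -, rfl⟩ := List.mem_map.mp hv
      simp [hc]
    · intro v hv
      obtain ⟨n, hn, rfl⟩ := List.mem_map.mp hv
      have hnD : n ∉ D := by simpa using List.of_mem_filter hn
      have : n ∉ xs := fun h => hnD ((PySem.Set.mem_ofList _ _).mpr h)
      simp [hc, List.count_eq_zero.mpr this]

-- B returns the same min/max over the combined node set
theorem pvBchar (graph : List (List Int)) (hne : graph ≠ []) :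
    miniAndMaxiDegrees_alt graph =
      ((PySem.List.min? ((pvN graph).map (fun n => ((pvIns graph).count n : Int))) (fun y => y)).getD 0,
       (PySem.List.max? ((pvN graph).map (fun n => ((pvIns graph).count n : Int))) (fun y => y)).getD 0,
       (PySem.List.min? ((pvN graph).map (fun n => ((pvOuts graph).count n : Int))) (fun y => y)).getD 0,
       (PySem.List.max? ((pvN graph).map (fun n => ((pvOuts graph).count n : Int))) (fun y => y)).getD 0) := by
  have hN : (pvN graph).Nodup := PySem.Set.nodup_ofList _
  have hins_ne : pvIns graph ≠ [] := by simp [pvIns, hne]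
  have houts_ne : pvOuts graph ≠ [] := by simp [pvOuts, hne]
  have hsubI : ∀ v ∈ pvIns graph, v ∈ pvN graph := by
    intro v hv; rw [pvN, PySem.Set.mem_ofList, List.mem_append]; exact Or.inl hv
  have hsubO : ∀ v ∈ pvOuts graph, v ∈ pvN graph := by
    intro v hv; rw [pvN, PySem.Set.mem_ofList, List.mem_append]; exact Or.inr hv
  have hI := pvSideB (pvIns graph) (pvN graph) hins_ne hN hsubI
  have hO := pvSideB (pvOuts graph) (pvN graph) houts_ne hN hsubO
  simp only [miniAndMaxiDegrees_alt]
  rw [show graph.map (fun g => PySem.List.pyGetD g 0 0) = pvOuts graph from rfl,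
      show graph.map (fun g => PySem.List.pyGetD g 1 0) = pvIns graph from rfl,
      pvNnodes graph, hI.1, hI.2, hO.1, hO.2]

-- ===== VERDICT (by name: the statement is the Claim_ definition above) =====
theorem miniAndMaxiDegrees_spec : Claim_equal_miniAndMaxiDegrees := by
  intro graph _ hpre
  unfold Spec_miniAndMaxiDegrees
  rw [pvAchar, pvBchar graph hpre.1]
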